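-- pv_equiv track=rewrite | github.com/anAwesomeWave/Galois-Field | sha3/main.py | rc_f
-- ===== SOURCE A (Python) =====
-- def rc_f(t: int) -> int:
--     if t % 255 == 0:
--         return 1
--     R = list("10000000")
--     for i in range(1, t % 255 + 1):
--         R = list("0") + R
--         R = list(R)
--         R[0] = str(int(R[0]) ^ int(R[8]))
--         R[4] = str(int(R[4]) ^ int(R[8]))
--         R[5] = str(int(R[5]) ^ int(R[8]))
--         R[6] = str(int(R[6]) ^ int(R[8]))
--         R = R[0:8]
--     return int(R[0])
-- ===== SOURCE B (Python) =====
-- def _gf_mul(a: int, b: int) -> int: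
--     # carry-less multiply of two polynomials over GF(2), reduced mod x^8+x^6+x^5+x^4+1
--     p = 0
--     while b:
--         if b & 1:
--             p ^= a
--         a <<= 1
--         if a & 0x100:
--             a ^= 0x171
--         b >>= 1
--     return p
--
--
-- def rc_f(t: int) -> int:
--     # rc_f(t) is the constant coefficient of x^(t % 255) in GF(2)[x] modulo
--     # x^8 + x^6 + x^5 + x^4 + 1: compute x^e by square-and-multiply.
--     e = t % 255
--     r = 1
--     b = 2  # the polynomial x
--     while e:
--         if e & 1:
--             r = _gf_mul(r, b)
--         b = _gf_mul(b, b)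
--         e >>= 1
--     return r & 1
-- ===== Notes on version B (the rewrite author's own statement) =====
-- stated objective: alternative
-- what changed: Replaced the step-by-step LFSR simulation (t%255 shift-and-reduce rounds on a list of '0'/'1' strings) by GF(2^8) exponentiation: rc_f(t) is the constant coefficient of x^(t%255) mod x^8+x^6+x^5+x^4+1, computed by square-and-multiply with a carry-less polynomial multiply.
import Mathlib
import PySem

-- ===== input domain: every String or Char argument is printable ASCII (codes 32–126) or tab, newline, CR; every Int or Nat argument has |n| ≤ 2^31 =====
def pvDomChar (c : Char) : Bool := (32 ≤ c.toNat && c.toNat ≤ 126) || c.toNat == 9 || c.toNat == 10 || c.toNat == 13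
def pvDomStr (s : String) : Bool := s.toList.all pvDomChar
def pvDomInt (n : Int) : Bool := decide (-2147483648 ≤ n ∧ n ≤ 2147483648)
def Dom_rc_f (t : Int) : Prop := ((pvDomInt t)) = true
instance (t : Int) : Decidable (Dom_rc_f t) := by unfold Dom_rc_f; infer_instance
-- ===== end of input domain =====

-- B replaces A's round-by-round LFSR simulation on a list of '0'/'1' strings by
-- square-and-multiply exponentiation of x in GF(2)[x] mod x^8+x^6+x^5+x^4+1
-- (objective: alternative algorithm).

-- ===== PORT A =====
def rc_f (t : Int) : Int :=
  if PySem.Int.mod t 255 == 0 then 1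
  else
    let R : List String := ["1", "0", "0", "0", "0", "0", "0", "0"]
    let R := (PySem.List.pyRange 1 (PySem.Int.mod t 255 + 1) 1).foldl
      (fun R _ =>
        let R := "0" :: R
        -- R[i] = str(int(R[i]) ^ int(R[8])): indices 0,4,5,6,8 are always in
        -- range (length 9) and the cells are always "0"/"1", so the defaults
        -- of pyGetD / (ofStr? _).getD are never taken
        let R := PySem.List.pySetD R 0 (PySem.Int.toStr (PySem.Int.bxor
          ((PySem.Int.ofStr? (PySem.List.pyGetD R 0 "")).getD 0)
          ((PySem.Int.ofStr? (PySem.List.pyGetD R 8 "")).getD 0)))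
        let R := PySem.List.pySetD R 4 (PySem.Int.toStr (PySem.Int.bxor
          ((PySem.Int.ofStr? (PySem.List.pyGetD R 4 "")).getD 0)
          ((PySem.Int.ofStr? (PySem.List.pyGetD R 8 "")).getD 0)))
        let R := PySem.List.pySetD R 5 (PySem.Int.toStr (PySem.Int.bxor
          ((PySem.Int.ofStr? (PySem.List.pyGetD R 5 "")).getD 0)
          ((PySem.Int.ofStr? (PySem.List.pyGetD R 8 "")).getD 0)))
        let R := PySem.List.pySetD R 6 (PySem.Int.toStr (PySem.Int.bxor
          ((PySem.Int.ofStr? (PySem.List.pyGetD R 6 "")).getD 0)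
          ((PySem.Int.ofStr? (PySem.List.pyGetD R 8 "")).getD 0)))
        PySem.List.slice R (some 0) (some 8)) R
    (PySem.Int.ofStr? (PySem.List.pyGetD R 0 "")).getD 0

-- ===== PORT B =====
-- Source B's `while b:` loop in _gf_mul; the extra `fuel` parameter only makes the
-- recursion structural (b halves each step, so fuel = b suffices; all values
-- are nonnegative Python ints, carried as Nat)
def gfMulAux : Nat → Nat → Nat → Nat → Nat
  | 0, _, _, p => p
  | fuel + 1, a, b, p =>
    if b = 0 then p
    else
      let p := if b &&& 1 ≠ 0 then p ^^^ a else p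
      let a := a <<< 1
      let a := if a &&& 0x100 ≠ 0 then a ^^^ 0x171 else a
      gfMulAux fuel a (b >>> 1) p

def gfMul (a b : Nat) : Nat := gfMulAux b a b 0

-- Source B's `while e:` square-and-multiply loop in rc_f (fuel = e, same guard)
def gfPowAux : Nat → Nat → Nat → Nat → Nat
  | 0, _, r, _ => r
  | fuel + 1, e, r, b =>
    if e = 0 then r
    else
      let r := if e &&& 1 ≠ 0 then gfMul r b else r
      let b := gfMul b b
      gfPowAux fuel (e >>> 1) r b

def rc_f_alt (t : Int) : Int :=
  let e := (PySem.Int.mod t 255).toNat   -- t % 255 ≥ 0 (Python %, positive divisor)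
  let r := gfPowAux e e 1 2
  ((r &&& 1 : Nat) : Int)

-- ===== PRECONDITION & SPEC =====
def Spec_rc_f (t : Int) (out : Int) : Prop := out = rc_f_alt t
instance (t : Int) (out : Int) : Decidable (Spec_rc_f t out) := by unfold Spec_rc_f; infer_instance

-- ===== CLAIM (what is proved, stated in full; the proofs are below) =====
def Claim_equal_rc_f : Prop := ∀ (t : Int), Dom_rc_f t → Spec_rc_f t (rc_f t)

-- ===== LEMMAS AND PROOFS =====

-- both programs depend on t only through t % 255
lemma mod_mod_255 (t : Int) :
    PySem.Int.mod (PySem.Int.mod t 255) 255 = PySem.Int.mod t 255 := by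
  simp only [PySem.Int.mod_eq_emod_of_pos (b := 255) (by norm_num)]
  exact Int.emod_emod_of_dvd t dvd_rfl

lemma rc_f_mod (t : Int) : rc_f (PySem.Int.mod t 255) = rc_f t := by
  simp only [rc_f, mod_mod_255]

lemma rc_f_alt_mod (t : Int) : rc_f_alt (PySem.Int.mod t 255) = rc_f_alt t := by
  simp only [rc_f_alt, mod_mod_255]

-- finite exhaustive check over the 255 residues
set_option maxRecDepth 100000 in
set_option maxHeartbeats 4000000 in
lemma rc_f_key : ∀ k : Fin 255, rc_f (k.val : Int) = rc_f_alt (k.val : Int) := by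
  decide

-- ===== VERDICT (by name: the statement is the Claim_ definition above) =====
theorem rc_f_spec : Claim_equal_rc_f := by
  intro t _
  unfold Spec_rc_f
  have hm0 : 0 ≤ PySem.Int.mod t 255 := PySem.Int.mod_nonneg (a := t) (by norm_num)
  have hm1 : PySem.Int.mod t 255 < 255 := PySem.Int.mod_lt (a := t) (by norm_num)
  have hk : (PySem.Int.mod t 255).toNat < 255 := by omega
  have hcast : ((PySem.Int.mod t 255).toNat : Int) = PySem.Int.mod t 255 :=
    Int.toNat_of_nonneg hm0
  have h := rc_f_key ⟨(PySem.Int.mod t 255).toNat, hk⟩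
  simp only [hcast] at h
  rw [← rc_f_mod t, ← rc_f_alt_mod t, h]
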